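-- pv_equiv track=rewrite | github.com/Tinningining/Model-Segmentation | om_device/code/tools/streaming_parser.py | _find_json_objects
-- ===== SOURCE A (Python) =====
-- from typing import List, Dict, Any, Optional
--
-- def _find_json_objects(text: str) -> List[tuple]:
--     """
--     用括号计数法找到文本中所有完整的顶层 JSON 对象。
--     返回 [(start, end), ...] 列表。
--     """
--     results = []
--     i = 0
--     while i < len(text):
--         if text[i] == '{':
--             depth = 0
--             in_string = False
--             escape_next = False
--             start = i
--             for j in range(i, len(text)):
--                 ch = text[j]
--                 if escape_next:
--                     escape_next = False
--                     continue
--                 if ch == '\\' and in_string: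
--                     escape_next = True
--                     continue
--                 if ch == '"' and not escape_next:
--                     in_string = not in_string
--                     continue
--                 if in_string:
--                     continue
--                 if ch == '{':
--                     depth += 1
--                 elif ch == '}':
--                     depth -= 1
--                     if depth == 0:
--                         results.append((start, j + 1))
--                         i = j + 1
--                         break
--             else:
--                 # 未闭合，停止搜索
--                 break
--         else:
--             i += 1
--     return results
-- ===== SOURCE B (Python) =====
-- from typing import List
--
--
-- def _find_json_objects(text: str) -> List[tuple]:
--     """Single flat scan: `start` is None outside a top-level object; inside,
--     track depth / in-string / escape and close the span when depth hits 0."""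
--     results = []
--     start = None
--     for i, ch in enumerate(text):
--         if start is None:
--             if ch == '{':
--                 start, depth, in_string, escape_next = i, 1, False, False
--         elif escape_next:
--             escape_next = False
--         elif ch == '\\' and in_string:
--             escape_next = True
--         elif ch == '"':
--             in_string = not in_string
--         elif in_string:
--             pass
--         elif ch == '{':
--             depth += 1
--         elif ch == '}':
--             depth -= 1
--             if depth == 0:
--                 results.append((start, i + 1))
--                 start = None
--     return results
-- ===== Notes on version B (the rewrite author's own statement) =====
-- stated objective: simpler
-- what changed: Replaces the nested while/for-with-index-jump-and-for-else structure by one flat loop over enumerate(text) driven by a single `start` state variable (None outside a top-level object), closing a span when depth returns to 0.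
import Mathlib
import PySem

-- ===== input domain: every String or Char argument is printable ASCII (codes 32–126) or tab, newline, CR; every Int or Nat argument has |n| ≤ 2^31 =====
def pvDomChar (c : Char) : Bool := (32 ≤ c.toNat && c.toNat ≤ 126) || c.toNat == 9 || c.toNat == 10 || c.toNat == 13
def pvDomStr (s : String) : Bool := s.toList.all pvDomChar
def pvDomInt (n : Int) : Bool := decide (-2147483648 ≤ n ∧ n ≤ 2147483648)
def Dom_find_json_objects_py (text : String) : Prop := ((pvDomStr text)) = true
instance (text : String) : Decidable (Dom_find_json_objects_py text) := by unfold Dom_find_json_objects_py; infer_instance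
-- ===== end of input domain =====

-- B replaces A's nested while/for-with-index-jump by one flat pass with an explicit
-- `start : Option` state; same return value, objective: simpler decomposition.

-- ===== PORT A =====
-- inner `for j in range(i, len(text))` scan of A; returns the index j at which the
-- object opened (with the given depth/string/escape state) closes, none if unclosed.
-- `fuel` only makes the recursion structural; it is called with fuel ≥ length - j,
-- so the `fuel = 0` exit is reached only when j has already run off the string.
def innerA (cs : List Char) (fuel : Nat) (j : Nat) (depth : Int) (instr esc : Bool) : Option Nat :=
  match fuel with
  | 0 => none
  | fuel + 1 =>
    if h : j < cs.length then
      if esc = true then innerA cs fuel (j+1) depth instr false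
      else if cs[j] = '\\' ∧ instr = true then innerA cs fuel (j+1) depth instr true
      else if cs[j] = '"' ∧ esc = false then innerA cs fuel (j+1) depth (!instr) esc
      else if instr = true then innerA cs fuel (j+1) depth instr esc
      else if cs[j] = '{' then innerA cs fuel (j+1) (depth+1) instr esc
      else if cs[j] = '}' then
        (if depth - 1 = 0 then some j else innerA cs fuel (j+1) (depth-1) instr esc)
      else innerA cs fuel (j+1) depth instr esc
    else none

-- outer `while i < len(text)` loop of A; again fuel ≥ length - i at every call
def outerA (cs : List Char) (fuel : Nat) (i : Nat) (results : List (Int × Int)) : List (Int × Int) :=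
  match fuel with
  | 0 => results
  | fuel + 1 =>
    if h : i < cs.length then
      if cs[i] = '{' then
        match innerA cs (cs.length - i) i 0 false false with
        | some j => outerA cs fuel (j+1) (results ++ [((i : Int), ((j + 1 : Nat) : Int))])
        | none => results
      else outerA cs fuel (i+1) results
    else results

def find_json_objects_py (text : String) : List (Int × Int) :=
  outerA text.toList text.toList.length 0 []

-- ===== PORT B =====
-- one step of B's flat loop: state is (results, start-state); start-state is none
-- outside any top-level object, otherwise (start, depth, in_string, escape_next)
def altStep (acc : List (Int × Int) × Option (Int × Int × Bool × Bool)) (p : Int × Char) :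
    List (Int × Int) × Option (Int × Int × Bool × Bool) :=
  let results := acc.1
  let (i, ch) := p
  match acc.2 with
  | none => if ch = '{' then (results, some (i, 1, false, false)) else (results, none)
  | some (s, depth, instr, esc) =>
    if esc = true then (results, some (s, depth, instr, false))
    else if ch = '\\' ∧ instr = true then (results, some (s, depth, instr, true))
    else if ch = '"' then (results, some (s, depth, !instr, esc))
    else if instr = true then (results, some (s, depth, instr, esc))
    else if ch = '{' then (results, some (s, depth + 1, instr, esc))
    else if ch = '}' then
      (if depth - 1 = 0 then (results ++ [(s, i + 1)], none)
       else (results, some (s, depth - 1, instr, esc)))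
    else (results, some (s, depth, instr, esc))

def find_json_objects_py_alt (text : String) : List (Int × Int) :=
  ((PySem.List.enumerate text.toList 0).foldl altStep ([], none)).1

-- ===== PRECONDITION & SPEC =====
def Spec_find_json_objects_py (text : String) (out : List (Int × Int)) : Prop := out = find_json_objects_py_alt text
instance (text : String) (out : List (Int × Int)) : Decidable (Spec_find_json_objects_py text out) := by unfold Spec_find_json_objects_py; infer_instance

-- ===== CLAIM (what is proved, stated in full; the proofs are below) =====
def Claim_equal_find_json_objects_py : Prop := ∀ (text : String), Dom_find_json_objects_py text → Spec_find_json_objects_py text (find_json_objects_py text)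

-- ===== LEMMAS AND PROOFS =====

theorem innerA_stop (cs : List Char) (fuel j : Nat) (d : Int) (si e : Bool)
    (hj : ¬ j < cs.length) : innerA cs fuel j d si e = none := by
  cases fuel <;> simp [innerA, hj]

theorem outerA_stop (cs : List Char) (fuel i : Nat) (r : List (Int × Int))
    (hi : ¬ i < cs.length) : outerA cs fuel i r = r := by
  cases fuel <;> simp [outerA, hi]

-- the break index returned by the inner scan is ≥ the scan start and in range
theorem innerA_le (cs : List Char) :
    ∀ (fuel j : Nat) (depth : Int) (instr esc : Bool) (j' : Nat),
      innerA cs fuel j depth instr esc = some j' → j ≤ j' ∧ j' < cs.length := by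
  intro fuel
  induction fuel with
  | zero => intro j d si e j' h; rw [innerA] at h; exact absurd h (by simp)
  | succ fuel ih =>
    intro j d si e j' h
    rw [innerA] at h
    by_cases hj : j < cs.length
    · rw [dif_pos hj] at h
      split_ifs at h <;>
        first
          | (injection h with h; omega)
          | (have := ih (j+1) _ _ _ j' h; omega)
    · rw [dif_neg hj] at h
      exact absurd h (by simp)

-- the outer loop does not depend on the fuel, as long as it covers the suffix
theorem outerA_congr (cs : List Char) :
    ∀ (f₁ f₂ i : Nat) (r : List (Int × Int)),
      cs.length - i ≤ f₁ → cs.length - i ≤ f₂ →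
      outerA cs f₁ i r = outerA cs f₂ i r := by
  intro f₁
  induction f₁ with
  | zero =>
    intro f₂ i r h1 h2
    rw [outerA_stop cs 0 i r (by omega), outerA_stop cs f₂ i r (by omega)]
  | succ f₁ ih =>
    intro f₂ i r h1 h2
    by_cases hi : i < cs.length
    · cases f₂ with
      | zero => omega
      | succ f₂ =>
        rw [outerA, outerA, dif_pos hi, dif_pos hi]
        by_cases hc : cs[i] = '{'
        · rw [if_pos hc, if_pos hc]
          cases hv : innerA cs (cs.length - i) i 0 false false with
          | none => simp
          | some j =>
            have hj := innerA_le cs (cs.length - i) i 0 false false j hv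
            apply ih <;> omega
        · rw [if_neg hc, if_neg hc]
          apply ih <;> omega
    · rw [outerA_stop cs _ i r hi, outerA_stop cs f₂ i r hi]

-- the two loops stay in lock-step: with no open object B's fold from position i
-- computes A's outer loop; with an open object it computes A's inner scan and resumes
theorem ab_sync (cs : List Char) :
    ∀ k i, cs.length - i ≤ k →
      (∀ r, (List.foldl altStep (r, none) (PySem.List.enumerate (cs.drop i) (i : Int))).1
          = outerA cs (cs.length - i) i r)
      ∧ (∀ r (s depth : Int) (instr esc : Bool),
          (List.foldl altStep (r, some (s, depth, instr, esc))
              (PySem.List.enumerate (cs.drop i) (i : Int))).1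
          = (innerA cs (cs.length - i) i depth instr esc).elim r
              (fun j => outerA cs (cs.length - (j+1)) (j+1) (r ++ [(s, ((j + 1 : Nat) : Int))]))) := by
  intro k
  induction k with
  | zero =>
    intro i hk
    have hi : ¬ i < cs.length := by omega
    have hnil : cs.drop i = [] := List.drop_eq_nil_of_le (by omega)
    constructor
    · intro r
      rw [hnil, outerA_stop cs _ i r hi]
      simp [PySem.List.enumerate]
    · intro r s d si e
      rw [hnil, innerA_stop cs _ i d si e hi]
      simp [PySem.List.enumerate]
  | succ k ih =>
    intro i hk
    by_cases hi : i < cs.length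
    · have hcast : ((i : Int) + 1) = (((i + 1 : Nat)) : Int) := by push_cast; ring
      have hfi : cs.length - i = (cs.length - (i + 1)) + 1 := by omega
      have hdrop : cs.drop i = cs[i] :: cs.drop (i+1) := List.drop_eq_getElem_cons hi
      have ihA := (ih (i+1) (by omega)).1
      have ihB := (ih (i+1) (by omega)).2
      constructor
      · intro r
        rw [hdrop, PySem.List.enumerate_cons, List.foldl_cons, hfi, outerA, dif_pos hi]
        by_cases hc : cs[i] = '{'
        · rw [show altStep (r, none) ((i : Int), cs[i]) = (r, some ((i : Int), 1, false, false)) from by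
            simp [altStep, hc]]
          rw [hcast, ihB r (i : Int) 1 false false]
          have hin : innerA cs (cs.length - i) i 0 false false
              = innerA cs (cs.length - (i+1)) (i+1) 1 false false := by
            rw [hfi, innerA, dif_pos hi]
            simp [hc]
          rw [if_pos hc, hin]
          cases hv : innerA cs (cs.length - (i+1)) (i+1) 1 false false with
          | none => simp
          | some j =>
            have hj := innerA_le cs (cs.length - (i+1)) (i+1) 1 false false j hv
            simp only [Option.elim]
            exact outerA_congr cs _ _ (j+1) _ (by omega) (by omega)
        · rw [show altStep (r, none) ((i : Int), cs[i]) = (r, none) from by simp [altStep, hc]]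
          rw [hcast, ihA r, if_neg hc]
      · intro r s d si e
        rw [hdrop, PySem.List.enumerate_cons, List.foldl_cons, hfi, innerA, dif_pos hi]
        by_cases he : e = true
        · rw [show altStep (r, some (s, d, si, e)) ((i : Int), cs[i]) = (r, some (s, d, si, false)) from by
            simp [altStep, he]]
          rw [hcast, ihB r s d si false, if_pos he]
        · have he' : e = false := by cases e <;> simp_all
          subst he'
          by_cases h1 : cs[i] = '\\' ∧ si = true
          · rw [show altStep (r, some (s, d, si, false)) ((i : Int), cs[i]) = (r, some (s, d, si, true)) from by
              simp [altStep, h1.1, h1.2]]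
            rw [hcast, ihB r s d si true]
            simp [h1]
          · by_cases h2 : cs[i] = '"'
            · rw [show altStep (r, some (s, d, si, false)) ((i : Int), cs[i]) = (r, some (s, d, !si, false)) from by
                simp [altStep, h2]]
              rw [hcast, ihB r s d (!si) false]
              simp [h2]
            · by_cases h3 : si = true
              · have hb : ¬ cs[i] = '\\' := fun hh => h1 ⟨hh, h3⟩
                rw [show altStep (r, some (s, d, si, false)) ((i : Int), cs[i]) = (r, some (s, d, si, false)) from by
                  simp [altStep, hb, h2, h3]]
                rw [hcast, ihB r s d si false]
                simp [hb, h2, h3]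
              · have h3' : si = false := by cases si <;> simp_all
                subst h3'
                by_cases h4 : cs[i] = '{'
                · rw [show altStep (r, some (s, d, false, false)) ((i : Int), cs[i]) = (r, some (s, d + 1, false, false)) from by
                    simp [altStep, h4]]
                  rw [hcast, ihB r s (d+1) false false]
                  simp [h4]
                · by_cases h5 : cs[i] = '}'
                  · by_cases h6 : d - 1 = 0
                    · rw [show altStep (r, some (s, d, false, false)) ((i : Int), cs[i]) = (r ++ [(s, (i : Int) + 1)], none) from by
                        simp [altStep, h5, h6]]
                      rw [hcast, ihA (r ++ [(s, ((i + 1 : Nat) : Int))])]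
                      simp [h5, h6]
                    · rw [show altStep (r, some (s, d, false, false)) ((i : Int), cs[i]) = (r, some (s, d - 1, false, false)) from by
                        simp [altStep, h5, h6]]
                      rw [hcast, ihB r s (d-1) false false]
                      simp [h5, h6]
                  · rw [show altStep (r, some (s, d, false, false)) ((i : Int), cs[i]) = (r, some (s, d, false, false)) from by
                      simp [altStep, h2, h4, h5]]
                    rw [hcast, ihB r s d false false]
                    simp [h2, h4, h5]
    · have hnil : cs.drop i = [] := List.drop_eq_nil_of_le (by omega)
      constructor
      · intro r
        rw [hnil, outerA_stop cs _ i r hi]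
        simp [PySem.List.enumerate]
      · intro r s d si e
        rw [hnil, innerA_stop cs _ i d si e hi]
        simp [PySem.List.enumerate]

-- ===== VERDICT (by name: the statement is the Claim_ definition above) =====
theorem find_json_objects_py_spec : Claim_equal_find_json_objects_py := by
  intro text _
  unfold Spec_find_json_objects_py find_json_objects_py find_json_objects_py_alt
  have h := (ab_sync text.toList text.toList.length 0 (by omega)).1 []
  simpa using h.symm
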